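-- pv_equiv track=rewrite | github.com/JPS-Cortland/python | serial/MimasV2/terminal02.py | ToHexList2
-- ===== SOURCE A (Python) =====
-- from math import log
--
-- def bytes_needed(n):
--     if n == 0:
--         return 1
--     return int(log(n, 256)) + 1
--
-- def ToHexList2(num):
--     length=bytes_needed(num)
--     if length==0:
--         return 0
--     liste=[]
--     for i in range(length):
--         bitwise=0xff<<i*8
--         liste.append(hex((num & bitwise)>>8*i))
--     liste.reverse()
--     return liste
-- ===== SOURCE B (Python) =====
-- def ToHexList2(num):
--     q, r = divmod(num, 256)
--     if q == 0:
--         return [hex(r)]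
--     return ToHexList2(q) + [hex(r)]
-- ===== Notes on version B (the rewrite author's own statement) =====
-- stated objective: simpler
-- what changed: B replaces A's log-based byte-count, per-index mask/shift loop and final reverse with a short divmod recursion that peels the low byte and recurses on num // 256.
import Mathlib
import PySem

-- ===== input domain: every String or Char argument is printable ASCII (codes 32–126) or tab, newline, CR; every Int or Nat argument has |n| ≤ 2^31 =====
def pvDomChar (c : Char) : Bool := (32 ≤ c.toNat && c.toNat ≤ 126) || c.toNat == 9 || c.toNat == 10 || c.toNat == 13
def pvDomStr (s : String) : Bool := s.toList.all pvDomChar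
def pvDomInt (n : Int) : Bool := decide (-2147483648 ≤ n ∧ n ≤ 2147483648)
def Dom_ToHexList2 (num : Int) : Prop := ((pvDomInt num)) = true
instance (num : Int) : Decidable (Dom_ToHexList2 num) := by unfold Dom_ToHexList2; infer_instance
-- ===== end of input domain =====

-- B peels bytes with a divmod recursion instead of computing a byte count via log and masking/shifting each byte (objective: simpler; equivalence is about return values only).

-- ===== PORT A =====
-- shared helper: Python's hex(), exact for arguments ≥ 0 (both programs apply it to byte values only)
def hexDigitChar (n : Nat) : Char := if n < 10 then Char.ofNat (48 + n) else Char.ofNat (87 + n)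

def hexChars (n : Nat) : List Char :=
  if _h : n < 16 then [hexDigitChar n]
  else hexChars (n / 16) ++ [hexDigitChar (n % 16)]
  decreasing_by exact Nat.div_lt_self (by omega) (by omega)

def pyHex (n : Int) : String := "0x" ++ String.ofList (hexChars n.toNat)

-- int(log(n, 256)) ported by hand as the exact integer logarithm: CPython's float log agrees with it
-- for every 0 ≤ n ≤ 2^31 (checked at the 256-power boundaries); for n < 0 math.log raises ValueError (excluded by Pre_).
def natLog256 (m : Nat) : Nat :=
  if _h : m < 256 then 0 else natLog256 (m / 256) + 1
  decreasing_by exact Nat.div_lt_self (by omega) (by omega)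

def bytes_needed (n : Int) : Int :=
  if n == 0 then 1 else (natLog256 n.toNat : Int) + 1

def ToHexList2 (num : Int) : List String :=
  let length := bytes_needed num
  if length == 0 then []   -- Python returns the int 0 here; unreachable, since bytes_needed never returns 0
  else
    let liste := (PySem.List.pyRange 0 length 1).foldl
      (fun acc i =>
        let bitwise : Int := (255 : Int) <<< (i * 8).toNat   -- 0xff << i*8; i ≥ 0 on the range, so .toNat is exact
        acc ++ [pyHex ((PySem.Int.band num bitwise) >>> (8 * i).toNat)]) []
    liste.reverse

-- ===== PORT B =====
-- fuel only makes the recursion total in Lean; for 0 ≤ num (Pre_) it is never exhausted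
def altGo (fuel : Nat) (num : Int) : List String :=
  match fuel with
  | 0 => []
  | fuel + 1 =>
    let q := PySem.Int.floordiv num 256
    let r := PySem.Int.mod num 256
    if q == 0 then [pyHex r] else altGo fuel q ++ [pyHex r]

def ToHexList2_alt (num : Int) : List String := altGo (num.toNat + 1) num

-- ===== PRECONDITION & SPEC =====
-- A raises ValueError (math.log domain error) for num < 0; Pre_ admits every input A returns on.
def Pre_ToHexList2 (num : Int) : Prop := 0 ≤ num
instance (num : Int) : Decidable (Pre_ToHexList2 num) := by unfold Pre_ToHexList2; infer_instance
def pvWitness_ToHexList2 : Int := (74565)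

def Spec_ToHexList2 (num : Int) (out : List String) : Prop := out = ToHexList2_alt num
instance (num : Int) (out : List String) : Decidable (Spec_ToHexList2 num out) := by unfold Spec_ToHexList2; infer_instance

-- ===== CLAIM (what is proved, stated in full; the proofs are below) =====
def Claim_equal_ToHexList2 : Prop := ∀ (num : Int), Dom_ToHexList2 num → Pre_ToHexList2 num → Spec_ToHexList2 num (ToHexList2 num)

-- ===== LEMMAS AND PROOFS =====
-- canonical form of both outputs: big-endian list of hex'ed base-256 digits, natLog256 n + 1 of them
def canonHex (n : Nat) : List String :=
  ((List.range (natLog256 n + 1)).map (fun i => pyHex ((n / 256 ^ i % 256 : Nat) : Int))).reverse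

theorem maskshift (n j : Nat) :
    (PySem.Int.band (↑n) ((255 : Int) <<< (8 * j))) >>> (8 * j) = ((n / 256 ^ j % 256 : Nat) : Int) := by
  have h : ((255 : Int) <<< (8 * j)) = ((255 <<< (8 * j) : Nat) : Int) := by simp
  rw [h, PySem.Int.band_natCast]
  have h2 : ((↑(n &&& 255 <<< (8 * j)) : Int)) >>> (8 * j) = (((n &&& 255 <<< (8 * j)) >>> (8 * j) : Nat) : Int) := by
    simp
  rw [h2]
  congr 1
  rw [Nat.shiftRight_and_distrib]
  have h3 : ((255 <<< (8 * j)) >>> (8 * j) : Nat) = 255 := by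
    simp [Nat.shiftLeft_eq, Nat.shiftRight_eq_div_pow, Nat.mul_div_cancel _ (Nat.pos_of_neZero _)]
  rw [h3]
  have h4 := Nat.and_two_pow_sub_one_eq_mod (n >>> (8 * j)) 8
  norm_num at h4
  rw [h4, Nat.shiftRight_eq_div_pow, pow_mul]
  norm_num

theorem bytes_needed_natCast (n : Nat) : bytes_needed (↑n) = ↑(natLog256 n + 1) := by
  unfold bytes_needed
  by_cases h : n = 0
  · subst h; simp [natLog256]
  · have hb : (((n : Int)) == 0) = false := by simp [h]
    rw [hb]
    simp

theorem A_eq_canon (n : Nat) : ToHexList2 (↑n) = canonHex n := by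
  have hcond : ¬ (((natLog256 n + 1 : Nat) : Int) == 0) = true := by simp; omega
  simp only [ToHexList2, canonHex, bytes_needed_natCast, if_neg hcond,
    PySem.List.pyRange_zero_natCast, List.foldl_map,
    PySem.List.foldl_append_singleton_eq_map, List.nil_append]
  congr 1
  apply List.map_congr_left
  intro j _
  have h8 : ((((j : Int)) * 8).toNat) = 8 * j := by omega
  have h8' : (((8 : Int) * (j : Int)).toNat) = 8 * j := by omega
  rw [h8, h8', Int.shiftLeft_natCast_right, Int.shiftRight_natCast_right, maskshift]

theorem canon_step (n : Nat) (h : ¬ n < 256) :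
    canonHex n = canonHex (n / 256) ++ [pyHex ((n % 256 : Nat) : Int)] := by
  unfold canonHex
  conv_lhs => rw [show natLog256 n = natLog256 (n / 256) + 1 from by rw [natLog256]; simp [h],
    List.range_succ_eq_map, List.map_cons, List.reverse_cons, List.map_map]
  congr 1
  · congr 1
    apply List.map_congr_left
    intro j _
    have hd : n / 256 ^ (j + 1) = n / 256 / 256 ^ j := by
      rw [Nat.div_div_eq_div_mul, ← pow_succ']
    simp [Function.comp, hd]
  · simp

theorem altGo_eq (n : Nat) : ∀ fuel : Nat, n < fuel → altGo fuel (↑n) = canonHex n := by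
  induction n using Nat.strong_induction_on with
  | _ n ih =>
    intro fuel hf
    match fuel, hf with
    | fuel + 1, _ =>
      show altGo (fuel + 1) (↑n) = canonHex n
      simp only [altGo]
      rw [show ((256 : Int)) = ((256 : Nat) : Int) by norm_num,
        PySem.Int.floordiv_natCast, PySem.Int.mod_natCast]
      by_cases h : n < 256
      · have hq : n / 256 = 0 := Nat.div_eq_of_lt h
        rw [if_pos (by simp [hq])]
        simp [canonHex, natLog256, h]
      · have hq : 0 < n / 256 := Nat.div_pos (by omega) (by omega)
        rw [if_neg (by simp; omega)]
        have hlt : n / 256 < n := Nat.div_lt_self (by omega) (by omega)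
        rw [ih (n / 256) hlt fuel (by omega), ← canon_step n h]

theorem ToHexList2_spec' (num : Int) (h : 0 ≤ num) : ToHexList2 num = ToHexList2_alt num := by
  have hn : num = ((num.toNat : Nat) : Int) := (Int.toNat_of_nonneg h).symm
  rw [hn, A_eq_canon]
  unfold ToHexList2_alt
  rw [Int.toNat_natCast]
  exact (altGo_eq num.toNat (num.toNat + 1) (by omega)).symm

-- ===== VERDICT (by name: the statement is the Claim_ definition above) =====
theorem ToHexList2_spec : Claim_equal_ToHexList2 := by
  intro num _ hpre
  unfold Spec_ToHexList2
  exact ToHexList2_spec' num hpre
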